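-- pv_equiv track=rewrite | github.com/mouseratti/katas | kata1/python/kata.py | make_kata
-- ===== SOURCE A (Python) =====
-- def make_kata(input_string=''):
--     output = ''
--     uniq = []
--     not_uniq = []
--     input_string = input_string.lower()
--     for symbol in input_string:
--         if symbol in uniq:
--             uniq.remove(symbol)
--             not_uniq.append(symbol)
--         elif symbol not in not_uniq:
--             uniq.append(symbol)
--     for symbol in input_string:
--         if symbol in uniq:
--             output += '('
--         else:
--             output += ')'
--     return output
-- ===== SOURCE B (Python) =====
-- def make_kata(input_string=''):
--     s = input_string.lower()
--     n = len(s)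
--     order = sorted(range(n), key=lambda i: s[i])
--     res = [')'] * n
--     for j in range(n):
--         p = order[j]
--         if (j == 0 or s[order[j - 1]] != s[p]) and (j == n - 1 or s[order[j + 1]] != s[p]):
--             res[p] = '('
--     return ''.join(res)
-- ===== Notes on version B (the rewrite author's own statement) =====
-- stated objective: alternative
-- what changed: A toggles each character between a uniq and a not_uniq membership list (linear scans inside the loop) and then rescans the string against uniq; B instead sorts the positions by character and marks exactly the positions whose sorted neighbours carry a different character, writing results back by original index.
import Mathlib
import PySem

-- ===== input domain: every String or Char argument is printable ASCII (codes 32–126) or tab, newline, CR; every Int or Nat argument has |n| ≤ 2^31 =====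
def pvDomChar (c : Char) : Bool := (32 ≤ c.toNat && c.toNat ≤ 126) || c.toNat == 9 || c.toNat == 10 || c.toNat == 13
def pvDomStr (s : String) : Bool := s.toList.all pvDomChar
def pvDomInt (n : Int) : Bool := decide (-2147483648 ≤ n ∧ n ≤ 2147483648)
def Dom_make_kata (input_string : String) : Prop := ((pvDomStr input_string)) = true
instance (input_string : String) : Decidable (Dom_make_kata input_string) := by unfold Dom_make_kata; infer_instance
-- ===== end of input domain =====

-- B replaces A's two membership lists (with their inner `in`-scans and a rescan) by
-- sort-positions-by-character plus one neighbour-comparison pass; objective: alternative algorithm.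

-- ===== PORT A =====
-- one step of A's first loop over the pair of lists (uniq, not_uniq)
def mkStepA (st : List Char × List Char) (symbol : Char) : List Char × List Char :=
  if symbol ∈ st.1 then
    -- uniq.remove(symbol): symbol ∈ uniq here, so remove? is `some`; the getD fallback is unreachable
    (((PySem.List.remove? st.1 symbol).getD st.1), st.2 ++ [symbol])
  else if symbol ∉ st.2 then (st.1 ++ [symbol], st.2)
  else st

def make_kata (input_string : String) : String :=
  let input_string := PySem.Str.lower input_string
  let st := input_string.toList.foldl mkStepA ([], [])
  let output := input_string.toList.foldl
    (fun output symbol => if symbol ∈ st.1 then output ++ "(" else output ++ ")") ""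
  output

-- ===== PORT B =====
-- the indices produced by range(n)/sorted are the nonnegative ints 0..n-1, so they are carried as Nat
def make_kata_alt (input_string : String) : String :=
  let s := (PySem.Str.lower input_string).toList
  let n := s.length
  let order := PySem.List.sorted (List.range n) (fun i => s.getD i ' ')
  let res := List.replicate n ')'
  let res := (List.range n).foldl
    (fun res j =>
      let p := order.getD j 0
      if (j == 0 || !(s.getD (order.getD (j - 1) 0) ' ' == s.getD p ' '))
         && (j == n - 1 || !(s.getD (order.getD (j + 1) 0) ' ' == s.getD p ' '))
      then res.set p '(' else res)
    res
  String.ofList res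

-- ===== PRECONDITION & SPEC =====
def Spec_make_kata (input_string : String) (out : String) : Prop := out = make_kata_alt input_string
instance (input_string : String) (out : String) : Decidable (Spec_make_kata input_string out) := by unfold Spec_make_kata; infer_instance

-- ===== CLAIM (what is proved, stated in full; the proofs are below) =====
def Claim_equal_make_kata : Prop := ∀ (input_string : String), Dom_make_kata input_string → Spec_make_kata input_string (make_kata input_string)

-- ===== LEMMAS AND PROOFS =====

-- ---- generic list/count helpers ----
theorem pv_getD_mem {α : Type} {l : List α} {b : Nat} (hb : b < l.length) (d : α) : l.getD b d ∈ l := by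
  rw [List.getD_eq_getElem l d hb]; exact List.getElem_mem hb

theorem pv_exists_getD_of_mem {α : Type} {l : List α} {v : α} (h : v ∈ l) (d : α) :
    ∃ b, b < l.length ∧ l.getD b d = v := by
  obtain ⟨i, hi, hv⟩ := List.mem_iff_getElem.mp h
  exact ⟨i, hi, by rw [List.getD_eq_getElem l d hi]; exact hv⟩

theorem pv_two_le_count_of_pair (l : List Char) (v : Char) :
    ∀ a b, a < b → b < l.length → l.getD a ' ' = v → l.getD b ' ' = v → 2 ≤ l.count v := by
  induction l with
  | nil => intro a b _ hb _ _; simp at hb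
  | cons c t ih =>
    intro a b hab hb ha hbv
    match a, b with
    | 0, b + 1 =>
      have hcv : c = v := ha
      have hbt : b < t.length := by simpa using hb
      have hm : v ∈ t := by rw [← (by simpa using hbv : t.getD b ' ' = v)]; exact pv_getD_mem hbt ' '
      have := List.count_pos_iff.mpr hm
      subst hcv
      rw [List.count_cons_self]
      omega
    | a + 1, b + 1 =>
      have := ih a b (by omega) (by simpa using hb) (by simpa using ha) (by simpa using hbv)
      rw [List.count_cons]
      omega

theorem pv_pair_of_two_le_count (l : List Char) (v : Char) (h : 2 ≤ l.count v) :
    ∃ a b, a < b ∧ b < l.length ∧ l.getD a ' ' = v ∧ l.getD b ' ' = v := by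
  induction l with
  | nil => simp at h
  | cons c t ih =>
    by_cases hcv : c = v
    · rw [List.count_cons, if_pos (beq_iff_eq.mpr hcv)] at h
      have hm : v ∈ t := List.count_pos_iff.mp (by omega)
      obtain ⟨b, hb, hbv⟩ := pv_exists_getD_of_mem hm ' '
      exact ⟨0, b + 1, by omega, by simpa using hb, hcv, by simpa using hbv⟩
    · have h2 : 2 ≤ t.count v := by
        rwa [List.count_cons_of_ne (by exact fun hh => hcv hh)] at h
      obtain ⟨a, b, hab, hb, ha', hb'⟩ := ih h2
      exact ⟨a + 1, b + 1, by omega, by simpa using hb, by simpa using ha', by simpa using hb'⟩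

theorem mkA_inv (p : List Char) :
    (p.foldl mkStepA ([], [])).1.Nodup ∧
    (∀ c, c ∈ (p.foldl mkStepA ([], [])).1 ↔ p.count c = 1) ∧
    (∀ c, c ∈ (p.foldl mkStepA ([], [])).2 ↔ 2 ≤ p.count c) := by
  induction p using List.reverseRecOn with
  | nil => simp
  | append_singleton l a ih =>
    obtain ⟨hnd, hu, hn⟩ := ih
    rw [List.foldl_append]
    simp only [List.foldl_cons, List.foldl_nil]
    have hcnt : ∀ c : Char, (l ++ [a]).count c = l.count c + (if a = c then 1 else 0) := by
      intro c
      simp [List.count_append, List.count_cons, List.count_nil, beq_iff_eq]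
    set st := l.foldl mkStepA ([], []) with hst
    unfold mkStepA
    by_cases ha : a ∈ st.1
    · rw [if_pos ha, PySem.List.remove?_eq_some_erase _ _ ha, Option.getD_some]
      have hca : l.count a = 1 := (hu a).mp ha
      refine ⟨hnd.erase a, ?_, ?_⟩
      · intro c
        rw [List.Nodup.mem_erase_iff hnd, hcnt c]
        by_cases hc : c = a
        · subst hc; simp [hca]
        · simp only [if_neg (fun h => hc (Eq.symm h)), Nat.add_zero]
          exact ⟨fun h => (hu c).mp h.2, fun h => ⟨hc, (hu c).mpr h⟩⟩
      · intro c
        rw [List.mem_append, List.mem_singleton, hcnt c]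
        by_cases hc : c = a
        · subst hc; simp [hca]
        · simp only [if_neg (fun h => hc (Eq.symm h)), Nat.add_zero, hc]
          simp [hn c]
    · rw [if_neg ha]
      by_cases ha2 : a ∈ st.2
      · rw [if_neg (by simpa using ha2)]
        have hca : 2 ≤ l.count a := (hn a).mp ha2
        refine ⟨hnd, ?_, ?_⟩
        · intro c
          rw [hcnt c]
          by_cases hc : c = a
          · subst hc
            constructor
            · intro h; exact absurd h ha
            · intro h; omega
          · simp only [if_neg (fun h => hc (Eq.symm h)), Nat.add_zero]
            exact hu c
        · intro c
          rw [hcnt c]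
          by_cases hc : c = a
          · subst hc
            constructor
            · intro _; omega
            · intro _; exact ha2
          · simp only [if_neg (fun h => hc (Eq.symm h)), Nat.add_zero]
            exact hn c
      · rw [if_pos (by simpa using ha2)]
        have hca : l.count a = 0 := by
          have h1 : l.count a ≠ 1 := fun h => ha ((hu a).mpr h)
          have h2 : ¬ 2 ≤ l.count a := fun h => ha2 ((hn a).mpr h)
          omega
        refine ⟨by simp only [List.nodup_append, List.nodup_singleton]; exact ⟨hnd, by simp, by intro x hx y hy; rw [List.mem_singleton] at hy; subst hy; exact fun h => ha (h ▸ hx)⟩, ?_, ?_⟩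
        · intro c
          rw [List.mem_append, List.mem_singleton, hcnt c]
          by_cases hc : c = a
          · subst hc; simp [hca]
          · simp only [if_neg (fun h => hc (Eq.symm h)), Nat.add_zero, hc, or_false]
            exact hu c
        · intro c
          rw [hcnt c]
          by_cases hc : c = a
          · subst hc; simp [hca, ha2]
          · simp only [if_neg (fun h => hc (Eq.symm h)), Nat.add_zero]
            exact hn c

theorem pv_out_fold (u : List Char) (l : List Char) : ∀ (acc : String),
    l.foldl (fun o c => if c ∈ u then o ++ "(" else o ++ ")") acc
      = acc ++ String.ofList (l.map (fun c => if c ∈ u then '(' else ')')) := by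
  induction l with
  | nil => intro acc; simp
  | cons c t ih =>
    intro acc
    simp only [List.foldl_cons, List.map_cons]
    rw [ih]
    by_cases hc : c ∈ u
    · rw [if_pos hc, if_pos hc, String.append_assoc, ← String.ofList_append]
      norm_num
    · rw [if_neg hc, if_neg hc, String.append_assoc, ← String.ofList_append]
      norm_num

theorem make_kata_eq (input : String) :
    make_kata input = String.ofList (((PySem.Str.lower input).toList).map
      (fun c => if ((PySem.Str.lower input).toList).count c = 1 then '(' else ')')) := by
  unfold make_kata
  dsimp only
  rw [pv_out_fold]
  have hiff := (mkA_inv (PySem.Str.lower input).toList).2.1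
  have hm : ((PySem.Str.lower input).toList).map
      (fun c => if c ∈ ((PySem.Str.lower input).toList.foldl mkStepA ([], [])).1 then '(' else ')')
      = ((PySem.Str.lower input).toList).map
      (fun c => if ((PySem.Str.lower input).toList).count c = 1 then '(' else ')') := by
    apply List.map_congr_left
    intro c _
    exact if_congr (hiff c) rfl rfl
  rw [hm]
  simp

-- ---- B side ----
-- the sorted position list and the character it carries at slot k (proof helpers)
def pvOrder (s : List Char) : List Nat :=
  PySem.List.sorted (List.range s.length) (fun i => s.getD i ' ')

def pvT (s : List Char) (k : Nat) : Char := s.getD ((pvOrder s).getD k 0) ' '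

-- "slot k of the sorted order is isolated: both sorted neighbours carry another character"
def pvND (s : List Char) (k : Nat) : Prop :=
  (k = 0 ∨ pvT s (k - 1) ≠ pvT s k) ∧ (k = s.length - 1 ∨ pvT s (k + 1) ≠ pvT s k)

theorem pvOrder_length (s : List Char) : (pvOrder s).length = s.length := by
  rw [pvOrder, (PySem.List.sorted_perm _ _ _).length_eq, List.length_range]

theorem pvT_mono (s : List Char) {p q : Nat} (hpq : p ≤ q) (hq : q < s.length) :
    pvT s p ≤ pvT s q := by
  have hq' : q < (PySem.List.sorted (List.range s.length) (fun i => s.getD i ' ')).length := by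
    rw [← pvOrder, pvOrder_length]; exact hq
  have h := PySem.List.key_sorted_getElem_mono (List.range s.length) (fun i => s.getD i ' ') hpq hq'
  simp only [pvT, pvOrder]
  rw [List.getD_eq_getElem _ 0 (by omega), List.getD_eq_getElem _ 0 (by exact hq')]
  exact h

theorem pv_map_getD_range (s : List Char) : (List.range s.length).map (fun i => s.getD i ' ') = s := by
  apply List.ext_getElem (by simp)
  intro i h1 h2
  rw [List.getElem_map, List.getElem_range, List.getD_eq_getElem _ _ h2]

theorem pvt_count (s : List Char) (v : Char) :
    ((pvOrder s).map (fun i => s.getD i ' ')).count v = s.count v := by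
  have hperm : ((pvOrder s).map (fun i => s.getD i ' ')).Perm
      ((List.range s.length).map (fun i => s.getD i ' ')) :=
    (PySem.List.sorted_perm _ _ _).map _
  rw [hperm.count_eq, pv_map_getD_range]

theorem pvt_getD (s : List Char) {k : Nat} (hk : k < s.length) :
    ((pvOrder s).map (fun i => s.getD i ' ')).getD k ' ' = pvT s k := by
  have hk' : k < ((pvOrder s).map (fun i => s.getD i ' ')).length := by
    rw [List.length_map, pvOrder_length]; exact hk
  rw [List.getD_eq_getElem _ _ hk', List.getElem_map, pvT,
    List.getD_eq_getElem _ 0 (by rw [pvOrder_length]; exact hk)]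

theorem pvt_len (s : List Char) :
    ((pvOrder s).map (fun i => s.getD i ' ')).length = s.length := by
  rw [List.length_map, pvOrder_length]

theorem pvND_iff (s : List Char) {k : Nat} (hk : k < s.length) :
    pvND s k ↔ s.count (pvT s k) = 1 := by
  have h1 : 1 ≤ ((pvOrder s).map (fun i => s.getD i ' ')).count (pvT s k) := by
    apply List.count_pos_iff.mpr
    rw [← pvt_getD s hk]
    exact pv_getD_mem (by rw [pvt_len]; exact hk) ' '
  rw [← pvt_count s (pvT s k)]
  constructor
  · intro hnd
    rcases Nat.lt_or_ge (((pvOrder s).map (fun i => s.getD i ' ')).count (pvT s k)) 2 with h2 | h2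
    · omega
    · exfalso
      obtain ⟨a, b, hab, hb, hav, hbv⟩ :=
        pv_pair_of_two_le_count ((pvOrder s).map (fun i => s.getD i ' ')) (pvT s k) h2
      rw [pvt_len] at hb
      have hTa : pvT s a = pvT s k := by rw [← pvt_getD s (by omega)]; exact hav
      have hTb : pvT s b = pvT s k := by rw [← pvt_getD s hb]; exact hbv
      rcases Nat.lt_or_ge a k with hak | hak
      · -- two slots at or left of k share the character: slot k-1 equals slot k
        have e1 : pvT s a ≤ pvT s (k - 1) := pvT_mono s (by omega) (by omega)
        have e2 : pvT s (k - 1) ≤ pvT s k := pvT_mono s (by omega) hk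
        have heq : pvT s (k - 1) = pvT s k := le_antisymm e2 (hTa ▸ e1)
        rcases hnd.1 with h0 | hne
        · omega
        · exact hne heq
      · have hbk : k + 1 ≤ b := by omega
        have e1 : pvT s k ≤ pvT s (k + 1) := pvT_mono s (by omega) (by omega)
        have e2 : pvT s (k + 1) ≤ pvT s b := pvT_mono s hbk hb
        have heq : pvT s (k + 1) = pvT s k := le_antisymm (hTb ▸ e2) e1
        rcases hnd.2 with h0 | hne
        · omega
        · exact hne heq
  · intro hcnt
    constructor
    · by_cases h0 : k = 0
      · exact Or.inl h0
      · refine Or.inr fun heq => ?_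
        have := pv_two_le_count_of_pair ((pvOrder s).map (fun i => s.getD i ' ')) (pvT s k)
          (k - 1) k (by omega) (by rw [pvt_len]; exact hk)
          (by rw [pvt_getD s (by omega)]; exact heq) (pvt_getD s hk)
        omega
    · by_cases h0 : k = s.length - 1
      · exact Or.inl h0
      · refine Or.inr fun heq => ?_
        have := pv_two_le_count_of_pair ((pvOrder s).map (fun i => s.getD i ' ')) (pvT s k)
          k (k + 1) (by omega) (by rw [pvt_len]; omega)
          (pvt_getD s hk) (by rw [pvt_getD s (by omega)]; exact heq)
        omega

-- the marking fold: the char at i ends up '(' exactly when some processed slot writes there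
theorem pv_foldl_set_mark (C : Nat → Bool) (g : Nat → Nat) :
    ∀ (L : List Nat) (r : List Char),
      (L.foldl (fun res j => if C j then res.set (g j) '(' else res) r).length = r.length ∧
      ∀ i, (L.foldl (fun res j => if C j then res.set (g j) '(' else res) r).getD i ')' =
        if (∃ j ∈ L, g j = i ∧ i < r.length ∧ C j = true) then '(' else r.getD i ')' := by
  intro L
  induction L with
  | nil => intro r; simp
  | cons j L ih =>
    intro r
    simp only [List.foldl_cons]
    obtain ⟨ihlen, ihget⟩ := ih (if C j then r.set (g j) '(' else r)
    have hlen' : (if C j then r.set (g j) '(' else r).length = r.length := by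
      by_cases hC : C j <;> simp [hC]
    refine ⟨by rw [ihlen, hlen'], ?_⟩
    intro i
    rw [ihget i, hlen']
    by_cases hC : C j
    · by_cases hgi : g j = i ∧ i < r.length
      · -- the head slot writes '(' at i; it stays '(' whatever the tail does
        have hset : (if C j then r.set (g j) '(' else r).getD i ')' = '(' := by
          rw [if_pos hC, List.getD_eq_getElem?_getD, List.getElem?_set,
            if_pos hgi.1, if_pos (hgi.1 ▸ hgi.2)]
          rfl
        rw [hset]
        have hex : ∃ j' ∈ j :: L, g j' = i ∧ i < r.length ∧ C j' = true :=
          ⟨j, List.mem_cons_self, hgi.1, hgi.2, hC⟩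
        rw [if_pos hex]
        split <;> rfl
      · have hset : (if C j then r.set (g j) '(' else r).getD i ')' = r.getD i ')' := by
          rw [if_pos hC, List.getD_eq_getElem?_getD, List.getElem?_set]
          by_cases hji : g j = i
          · have hil : ¬ i < r.length := fun hl => hgi ⟨hji, hl⟩
            rw [if_pos hji, if_neg (by omega : ¬ g j < r.length),
              List.getD_eq_getElem?_getD, List.getElem?_eq_none (by omega : r.length ≤ i)]
          · rw [if_neg hji, ← List.getD_eq_getElem?_getD]
        rw [hset]
        apply if_congr _ rfl rfl
        constructor
        · rintro ⟨j', hj', h⟩; exact ⟨j', List.mem_cons_of_mem _ hj', h⟩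
        · rintro ⟨j', hj', h⟩
          rcases List.mem_cons.mp hj' with rfl | hj'
          · exact absurd ⟨h.1, h.2.1⟩ hgi
          · exact ⟨j', hj', h⟩
    · rw [if_neg hC]
      apply if_congr _ rfl rfl
      constructor
      · rintro ⟨j', hj', h⟩; exact ⟨j', List.mem_cons_of_mem _ hj', h⟩
      · rintro ⟨j', hj', h⟩
        rcases List.mem_cons.mp hj' with rfl | hj'
        · exact absurd h.2.2 (by simpa using hC)
        · exact ⟨j', hj', h⟩

-- the port's Bool test at slot j is exactly pvND
theorem pvC_iff (s : List Char) (j : Nat) :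
    (((j == 0 || !(s.getD ((pvOrder s).getD (j - 1) 0) ' ' == s.getD ((pvOrder s).getD j 0) ' '))
      && (j == s.length - 1 || !(s.getD ((pvOrder s).getD (j + 1) 0) ' ' == s.getD ((pvOrder s).getD j 0) ' '))) = true)
    ↔ pvND s j := by
  simp [pvND, pvT]

-- existence of a marking slot for position i says exactly that s[i] is unique in s
theorem pv_exists_iff (s : List Char) {i : Nat} (hi : i < s.length) :
    (∃ j ∈ List.range s.length, (pvOrder s).getD j 0 = i ∧ i < s.length ∧
      ((j == 0 || !(s.getD ((pvOrder s).getD (j - 1) 0) ' ' == s.getD ((pvOrder s).getD j 0) ' '))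
       && (j == s.length - 1 || !(s.getD ((pvOrder s).getD (j + 1) 0) ' ' == s.getD ((pvOrder s).getD j 0) ' '))) = true)
    ↔ s.count (s.getD i ' ') = 1 := by
  constructor
  · rintro ⟨j, hjr, hji, -, hC⟩
    have hj : j < s.length := by simpa using hjr
    have hnd : pvND s j := (pvC_iff s j).mp hC
    have := (pvND_iff s hj).mp hnd
    rwa [pvT, hji] at this
  · intro hcnt
    have hio : i ∈ pvOrder s := by
      rw [pvOrder, (PySem.List.sorted_perm _ _ _).mem_iff]
      simpa using hi
    obtain ⟨j, hj, hji⟩ := pv_exists_getD_of_mem hio 0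
    have hjn : j < s.length := by rw [← pvOrder_length s]; exact hj
    have hndj : pvND s j := by
      apply (pvND_iff s hjn).mpr
      rw [pvT, hji]
      exact hcnt
    exact ⟨j, by simpa using hjn, hji, hi, (pvC_iff s j).mpr hndj⟩

theorem make_kata_alt_eq (input : String) :
    make_kata_alt input = String.ofList (((PySem.Str.lower input).toList).map
      (fun c => if ((PySem.Str.lower input).toList).count c = 1 then '(' else ')')) := by
  unfold make_kata_alt
  dsimp only
  set s := (PySem.Str.lower input).toList with hs
  congr 1
  obtain ⟨hlen, hget⟩ := pv_foldl_set_mark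
    (fun j => (j == 0 || !(s.getD ((pvOrder s).getD (j - 1) 0) ' ' == s.getD ((pvOrder s).getD j 0) ' '))
       && (j == s.length - 1 || !(s.getD ((pvOrder s).getD (j + 1) 0) ' ' == s.getD ((pvOrder s).getD j 0) ' ')))
    (fun j => (pvOrder s).getD j 0)
    (List.range s.length) (List.replicate s.length ')')
  rw [show (PySem.List.sorted (List.range s.length) (fun i => s.getD i ' ')) = pvOrder s from rfl]
  apply List.ext_getElem
  · rw [hlen]; simp
  · intro i h1 h2
    have hi : i < s.length := by simpa using h2
    rw [← List.getD_eq_getElem _ ')' h1, ← List.getD_eq_getElem _ ')' h2, hget i]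
    have hrep : (List.replicate s.length ')').getD i ')' = ')' := by
      rw [List.getD_eq_getElem _ _ (by simpa using hi), List.getElem_replicate]
    rw [hrep, List.length_replicate]
    have hmapi : (s.map (fun c => if s.count c = 1 then '(' else ')')).getD i ')'
        = if s.count (s.getD i ' ') = 1 then '(' else ')' := by
      rw [List.getD_eq_getElem _ _ (by simpa using hi), List.getElem_map,
        List.getD_eq_getElem _ _ hi]
    rw [hmapi]
    exact if_congr (pv_exists_iff s hi) rfl rfl

-- ===== VERDICT (by name: the statement is the Claim_ definition above) =====
theorem make_kata_spec : Claim_equal_make_kata := by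
  intro input _
  unfold Spec_make_kata
  rw [make_kata_eq, make_kata_alt_eq]
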